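-- pv_equiv track=rewrite | github.com/GSYBD/SXLNLP | 王冠荃/week4.py | all_segmentations
-- ===== SOURCE A (Python) =====
-- def all_segmentations(sentence, word_dict):
--     n = len(sentence)
--     dp = [[] for _ in range(n + 1)]
--     dp[0] = [[]]
--
--     for i in range(n):
--         for j in range(i + 1, n + 1):
--             word = sentence[i:j]
--             if word in word_dict:
--                for segmentation in dp[i]:
--                     dp[j].append(segmentation + [word])
--
--     return dp[n]
-- ===== SOURCE B (Python) =====
-- def all_segmentations(sentence, word_dict):
--     # top-down memoized recursion on prefix end-position
--     memo = {0: [[]]}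
--     def seg(j):
--         if j in memo:
--             return memo[j]
--         res = []
--         for i in range(j):
--             word = sentence[i:j]
--             if word in word_dict:
--                 for s in seg(i):
--                     res.append(s + [word])
--         memo[j] = res
--         return res
--     return seg(len(sentence))
-- ===== Notes on version B (the rewrite author's own statement) =====
-- stated objective: alternative
-- what changed: Replaces A's bottom-up DP table (dp[0..n] filled by a double loop with appends to later cells) by a top-down memoized recursion seg(j) on the prefix end-position, recursing over the last word's start i in ascending order so the output order is identical.
import Mathlib
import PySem

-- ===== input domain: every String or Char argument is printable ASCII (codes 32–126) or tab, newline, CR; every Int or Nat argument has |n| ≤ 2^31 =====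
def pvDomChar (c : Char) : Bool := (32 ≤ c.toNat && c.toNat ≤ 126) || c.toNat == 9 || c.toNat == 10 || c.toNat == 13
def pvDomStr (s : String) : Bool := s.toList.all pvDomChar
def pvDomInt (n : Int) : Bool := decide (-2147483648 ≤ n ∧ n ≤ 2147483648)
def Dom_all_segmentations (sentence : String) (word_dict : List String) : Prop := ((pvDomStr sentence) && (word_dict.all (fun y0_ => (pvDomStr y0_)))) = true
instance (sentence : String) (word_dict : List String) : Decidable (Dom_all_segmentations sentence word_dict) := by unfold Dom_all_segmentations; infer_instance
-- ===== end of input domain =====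

-- B replaces A's bottom-up DP table with a top-down recursion on the prefix
-- end-position (memoized in the Python); same results in the same order.

-- sentence[i:j] for natural 0 ≤ i, j (exact: Python's slice with nonnegative
-- bounds clamps exactly like drop/take)
def pvSlice (cs : List Char) (i j : Nat) : String := String.ofList ((cs.drop i).take (j - i))

-- ===== PORT A =====
-- dp is the Python list `dp`; dp[j].append over dp[i] becomes ++ map
def all_segmentations (sentence : String) (word_dict : List String) : List (List String) :=
  let cs := sentence.toList
  let n := cs.length
  let dp0 : List (List (List String)) := (List.replicate (n + 1) []).set 0 [[]]
  let dp := (List.range n).foldl (fun dp i =>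
      (List.range' (i + 1) (n - i)).foldl (fun dp j =>
        let word := pvSlice cs i j
        if word ∈ word_dict then
          dp.set j (dp.getD j [] ++ (dp.getD i []).map (fun s => s ++ [word]))
        else dp) dp) dp0
  dp.getD n []

-- ===== PORT B =====
-- seg j: all segmentations of the first j characters (the Python's memo cache
-- only avoids recomputation and does not affect the value)
def segB (cs : List Char) (word_dict : List String) (j : Nat) : List (List String) :=
  if j = 0 then [[]]
  else
    (List.range j).attach.foldl (fun res i =>
      let word := pvSlice cs i.1 j
      if word ∈ word_dict then
        res ++ (segB cs word_dict i.1).map (fun s => s ++ [word])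
      else res) []
termination_by j
decreasing_by exact List.mem_range.mp i.2

def all_segmentations_alt (sentence : String) (word_dict : List String) : List (List String) :=
  segB sentence.toList word_dict sentence.toList.length

-- ===== PRECONDITION & SPEC =====
def Spec_all_segmentations (sentence : String) (word_dict : List String) (out : List (List String)) : Prop := out = all_segmentations_alt sentence word_dict
instance (sentence : String) (word_dict : List String) (out : List (List String)) : Decidable (Spec_all_segmentations sentence word_dict out) := by unfold Spec_all_segmentations; infer_instance

-- ===== CLAIM (what is proved, stated in full; the proofs are below) =====
def Claim_equal_all_segmentations : Prop := ∀ (sentence : String) (word_dict : List String), Dom_all_segmentations sentence word_dict → Spec_all_segmentations sentence word_dict (all_segmentations sentence word_dict)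

-- ===== LEMMAS AND PROOFS =====

-- contribution of last-word-start i to position j
def pvC (cs : List Char) (wd : List String) (i j : Nat) : List (List String) :=
  if pvSlice cs i j ∈ wd then (segB cs wd i).map (fun s => s ++ [pvSlice cs i j]) else []

-- A's inner/outer loop bodies, named for the proofs (definitionally the port's lambdas)
def pvInner (cs : List Char) (wd : List String) (i : Nat)
    (dp : List (List (List String))) (j : Nat) : List (List (List String)) :=
  if pvSlice cs i j ∈ wd then
    dp.set j (dp.getD j [] ++ (dp.getD i []).map (fun s => s ++ [pvSlice cs i j]))
  else dp

def pvOuter (cs : List Char) (wd : List String) (n : Nat)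
    (dp : List (List (List String))) (i : Nat) : List (List (List String)) :=
  (List.range' (i + 1) (n - i)).foldl (pvInner cs wd i) dp

lemma segB_flatMap (cs : List Char) (wd : List String) (j : Nat) (hj : j ≠ 0) :
    segB cs wd j = (List.range j).flatMap (fun i => pvC cs wd i j) := by
  rw [segB, if_neg hj]
  rw [List.foldl_attach (f := fun res i =>
      if pvSlice cs i j ∈ wd then res ++ (segB cs wd i).map (fun s => s ++ [pvSlice cs i j]) else res)]
  have h1 : (List.range j).foldl (fun res i =>
      if pvSlice cs i j ∈ wd then res ++ (segB cs wd i).map (fun s => s ++ [pvSlice cs i j]) else res)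
        ([] : List (List String))
      = (List.range j).foldl (fun acc i => acc ++ pvC cs wd i j) [] := by
    apply PySem.List.foldl_congr_mem
    intro acc i _
    unfold pvC; split <;> simp [*]
  rw [h1, PySem.List.foldl_append_eq_flatMap]
  simp

lemma inner_loop (cs : List Char) (wd : List String) (i : Nat) :
    ∀ (L : List Nat) (dp : List (List (List String))), (∀ j ∈ L, i < j) → L.Nodup →
      ((L.foldl (pvInner cs wd i) dp).length = dp.length ∧
       ∀ j', (L.foldl (pvInner cs wd i) dp).getD j' [] =
          if j' ∈ L ∧ j' < dp.length then
            dp.getD j' [] ++ (if pvSlice cs i j' ∈ wd then (dp.getD i []).map (fun s => s ++ [pvSlice cs i j']) else [])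
          else dp.getD j' []) := by
  intro L
  induction L with
  | nil => intro dp _ _; simp
  | cons j L' ih =>
    intro dp hlt hnd
    have hij : i < j := hlt j (by simp)
    have hjL' : j ∉ L' := (List.nodup_cons.mp hnd).1
    have hnd' : L'.Nodup := (List.nodup_cons.mp hnd).2
    have hlt' : ∀ j'' ∈ L', i < j'' := fun j'' h => hlt j'' (by simp [h])
    set dp' := pvInner cs wd i dp j with hdp'
    have hlen' : dp'.length = dp.length := by
      rw [hdp']; unfold pvInner; split <;> simp
    have hget_ne : ∀ j'', j'' ≠ j → dp'.getD j'' [] = dp.getD j'' [] := by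
      intro j'' hne
      rw [hdp']; unfold pvInner
      split
      · simp [List.getD_eq_getElem?_getD, List.getElem?_set_ne (Ne.symm hne)]
      · rfl
    have hget_j : dp'.getD j [] =
        if j < dp.length then
          dp.getD j [] ++ (if pvSlice cs i j ∈ wd then (dp.getD i []).map (fun s => s ++ [pvSlice cs i j]) else [])
        else dp.getD j [] := by
      rw [hdp']; unfold pvInner
      by_cases hm : pvSlice cs i j ∈ wd
      · rw [if_pos hm]
        by_cases hjl : j < dp.length
        · rw [if_pos hjl, if_pos hm]
          simp [List.getD_eq_getElem?_getD, List.getElem?_set_self hjl]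
        · rw [if_neg hjl, List.set_eq_of_length_le (by omega)]
      · rw [if_neg hm]
        by_cases hjl : j < dp.length
        · rw [if_pos hjl, if_neg hm, List.append_nil]
        · rw [if_neg hjl]
    have hgi : dp'.getD i [] = dp.getD i [] := hget_ne i (by omega)
    obtain ⟨ihlen, ihget⟩ := ih dp' hlt' hnd'
    have hfold : (j :: L').foldl (pvInner cs wd i) dp = L'.foldl (pvInner cs wd i) dp' := rfl
    refine ⟨by rw [hfold, ihlen, hlen'], ?_⟩
    intro j'
    rw [hfold, ihget j', hlen', hgi]
    by_cases hje : j' = j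
    · subst hje
      simp only [List.getD_eq_getElem?_getD] at hget_j
      simp [hjL', hget_j]
    · rw [hget_ne j' hje]
      by_cases hmem : j' ∈ L' <;> simp [hmem, hje]

-- the DP invariant: after the first k outer iterations, dp[j] holds the
-- contributions of all last-word starts i < min k j
lemma outer_inv (cs : List Char) (wd : List String) (k : Nat) (hk : k ≤ cs.length) :
    ((List.range k).foldl (pvOuter cs wd cs.length)
        ((List.replicate (cs.length + 1) []).set 0 [[]])).length = cs.length + 1 ∧
    ∀ j, ((List.range k).foldl (pvOuter cs wd cs.length)
        ((List.replicate (cs.length + 1) []).set 0 [[]])).getD j [] =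
      if j = 0 then [[]]
      else if j ≤ cs.length then (List.range (min k j)).flatMap (fun i => pvC cs wd i j)
      else [] := by
  set n := cs.length with hn
  induction k with
  | zero =>
    refine ⟨by simp, ?_⟩
    intro j
    simp only [List.range_zero, List.foldl_nil]
    rcases Nat.eq_zero_or_pos j with h0 | h0
    · subst h0
      rw [if_pos rfl, List.getD_eq_getElem?_getD, List.getElem?_set_self (by simp)]
      rfl
    · rw [if_neg (by omega), List.getD_eq_getElem?_getD,
        List.getElem?_set_ne (by omega : (0 : Nat) ≠ j)]
      by_cases hjn : j ≤ n
      · rw [if_pos hjn]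
        simp [Nat.lt_succ_of_le hjn]
      · rw [if_neg hjn]
        simp only [List.getElem?_replicate, if_neg (by omega : ¬ j < n + 1)]
        rfl
  | succ k ih =>
    obtain ⟨ihlen, ihget⟩ := ih (by omega)
    set dpk := (List.range k).foldl (pvOuter cs wd n)
        ((List.replicate (n + 1) []).set 0 [[]]) with hdpk
    have hsegk : dpk.getD k [] = segB cs wd k := by
      rw [ihget k]
      by_cases hk0 : k = 0
      · subst hk0; simp [segB]
      · rw [if_neg hk0, if_pos (by omega), Nat.min_self, segB_flatMap cs wd k hk0]
    have hfold : (List.range (k + 1)).foldl (pvOuter cs wd n)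
        ((List.replicate (n + 1) []).set 0 [[]]) = pvOuter cs wd n dpk k := by
      rw [List.range_succ, List.foldl_append, ← hdpk]; rfl
    obtain ⟨illen, ilget⟩ := inner_loop cs wd k (List.range' (k + 1) (n - k)) dpk
      (by intro j hj; have := List.mem_range'_1.mp hj; omega) List.nodup_range'
    refine ⟨by rw [hfold]; exact illen.trans ihlen, ?_⟩
    intro j
    rw [hfold]
    show ((List.range' (k + 1) (n - k)).foldl (pvInner cs wd k) dpk).getD j [] = _
    rw [ilget j, ihlen, hsegk]
    by_cases hin : j ∈ List.range' (k + 1) (n - k)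
    · have hrange := List.mem_range'_1.mp hin
      have hj0 : j ≠ 0 := by omega
      rw [if_pos ⟨hin, by omega⟩, ihget j, if_neg hj0, if_pos (by omega : j ≤ n),
        if_neg hj0, if_pos (by omega : j ≤ n),
        (by omega : min k j = k), (by omega : min (k + 1) j = k + 1),
        List.range_succ, List.flatMap_append]
      simp [pvC]
    · rw [if_neg (fun h => hin h.1), ihget j]
      by_cases hj0 : j = 0
      · simp [hj0]
      · by_cases hjn : j ≤ n
        · have hjk : j ≤ k := by
            by_contra hc
            exact hin (List.mem_range'_1.mpr ⟨by omega, by omega⟩)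
          rw [if_neg hj0, if_pos hjn, if_neg hj0, if_pos hjn,
            Nat.min_eq_right hjk, Nat.min_eq_right (by omega)]
        · simp [hj0, hjn]

theorem all_segmentations_spec : Claim_equal_all_segmentations := by
  intro s wd _
  unfold Spec_all_segmentations all_segmentations all_segmentations_alt
  obtain ⟨_, hget⟩ := outer_inv s.toList wd s.toList.length (le_refl _)
  show ((List.range s.toList.length).foldl (pvOuter s.toList wd s.toList.length)
      ((List.replicate (s.toList.length + 1) []).set 0 [[]])).getD s.toList.length []
    = segB s.toList wd s.toList.length
  rw [hget s.toList.length]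
  by_cases hn0 : s.toList.length = 0
  · rw [if_pos hn0, hn0]
    simp [segB]
  · rw [if_neg hn0, if_pos (le_refl _), Nat.min_self, segB_flatMap _ _ _ hn0]
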